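-- pv_equiv track=rewrite | github.com/monoyumono7-netizen/peizhi | mono-skills/mini-wiki/scripts/generate_wiki.py | filter_modules_by_changes
-- ===== SOURCE A (Python) =====
-- from typing import Any, Dict, List, Optional, Sequence, Tuple
--
-- def filter_modules_by_changes(modules: List[Dict[str, Any]], changed_paths: Sequence[str]) -> List[Dict[str, Any]]:
--     if not changed_paths:
--         return modules
--     changed = tuple(changed_paths)
--
--     def touched(module: Dict[str, Any]) -> bool:
--         module_path = str(module.get("path", "")).strip("/")
--         if not module_path:
--             return False
--         prefix = module_path + "/"
--         return any(item == module_path or item.startswith(prefix) for item in changed)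
--
--     filtered = [module for module in modules if touched(module)]
--     return filtered or modules
-- ===== SOURCE B (Python) =====
-- def filter_modules_by_changes(modules, changed_paths):
--     if not changed_paths:
--         return modules
--     # Precompute the set of every module path any changed path could touch:
--     # an item touches module_path iff item == module_path or item starts with
--     # module_path + "/", i.e. module_path is item or one of item's slash-ancestors.
--     ancestors = set()
--     for item in changed_paths:
--         for i, ch in enumerate(item):
--             if ch == '/':
--                 ancestors.add(item[:i])
--         ancestors.add(item)
--     filtered = []
--     for module in modules:
--         path = str(module.get("path", "")).strip("/")
--         if path and path in ancestors:
--             filtered.append(module)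
--     return filtered or modules
-- ===== Notes on version B (the rewrite author's own statement) =====
-- stated objective: alternative
-- what changed: Instead of scanning the whole changed_paths tuple for every module, B precomputes once the set of all changed paths together with all of their slash-ancestors, so each module's touched-test becomes a single set-membership lookup; the precompute can cost more than A's scans when modules are few.
import Mathlib
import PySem

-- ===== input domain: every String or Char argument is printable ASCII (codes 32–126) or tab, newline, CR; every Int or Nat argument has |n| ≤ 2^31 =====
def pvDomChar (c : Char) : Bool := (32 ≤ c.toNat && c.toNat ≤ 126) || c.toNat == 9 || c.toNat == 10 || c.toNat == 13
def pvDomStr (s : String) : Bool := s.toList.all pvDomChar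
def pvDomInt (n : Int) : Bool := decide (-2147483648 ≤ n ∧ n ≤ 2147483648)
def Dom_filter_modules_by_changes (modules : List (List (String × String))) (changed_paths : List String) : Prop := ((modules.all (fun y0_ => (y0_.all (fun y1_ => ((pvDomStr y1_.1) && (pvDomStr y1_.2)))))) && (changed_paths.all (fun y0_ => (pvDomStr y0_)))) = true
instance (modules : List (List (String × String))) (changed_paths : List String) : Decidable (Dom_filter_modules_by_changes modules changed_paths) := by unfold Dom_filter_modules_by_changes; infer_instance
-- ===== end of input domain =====

-- B replaces A's per-module scan of changed_paths by one precomputed set of all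
-- changed paths and their slash-ancestors, turning each touched-test into a set lookup (alternative algorithm).


-- ===== PORT A =====
-- A's inner helper `touched`; strings handled on the List Char side (PySem.Chars is exact there)
def fmbcTouched (changed : List String) (module : List (String × String)) : Bool :=
  let mp := (PySem.Str.stripChars ((PySem.Dict.mk module).getD "path" "") "/").toList
  if mp.isEmpty then false
  else changed.any (fun item =>
    item.toList == mp || PySem.Chars.startswith item.toList (mp ++ ['/']))

def filter_modules_by_changes (modules : List (List (String × String))) (changed_paths : List String) : List (List (String × String)) :=
  if changed_paths.isEmpty then modules
  else
    let filtered := modules.filter (fun module => fmbcTouched changed_paths module)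
    if filtered.isEmpty then modules else filtered

-- ===== PORT B =====
-- the `ancestors` set of Source B: every changed path and every prefix of it cut at a '/'
def fmbcAncestors (changed_paths : List String) : PySem.Set (List Char) :=
  changed_paths.foldl (fun anc item =>
    PySem.Set.add
      ((PySem.List.enumerate item.toList).foldl
        (fun anc2 q =>
          if q.2 == '/' then PySem.Set.add anc2 (PySem.List.slice item.toList none (some q.1))
          else anc2)
        anc)
      item.toList)
    PySem.Set.empty

def filter_modules_by_changes_alt (modules : List (List (String × String))) (changed_paths : List String) : List (List (String × String)) :=
  if changed_paths.isEmpty then modules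
  else
    let anc := fmbcAncestors changed_paths
    let filtered := modules.foldl (fun acc module =>
      let p := (PySem.Str.stripChars ((PySem.Dict.mk module).getD "path" "") "/").toList
      if !p.isEmpty && PySem.Set.contains anc p then acc ++ [module] else acc) []
    if filtered.isEmpty then modules else filtered

-- ===== PRECONDITION & SPEC =====
def Spec_filter_modules_by_changes (modules : List (List (String × String))) (changed_paths : List String) (out : List (List (String × String))) : Prop := out = filter_modules_by_changes_alt modules changed_paths
instance (modules : List (List (String × String))) (changed_paths : List String) (out : List (List (String × String))) : Decidable (Spec_filter_modules_by_changes modules changed_paths out) := by unfold Spec_filter_modules_by_changes; infer_instance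

-- ===== CLAIM (what is proved, stated in full; the proofs are below) =====
def Claim_equal_filter_modules_by_changes : Prop := ∀ (modules : List (List (String × String))) (changed_paths : List String), Dom_filter_modules_by_changes modules changed_paths → Spec_filter_modules_by_changes modules changed_paths (filter_modules_by_changes modules changed_paths)

-- ===== LEMMAS AND PROOFS =====

-- membership in the inner (one item) fold of fmbcAncestors, generalized over the enumerated list
theorem fmbc_mem_inner (cs : List Char) (L : List (Int × Char)) (s0 : PySem.Set (List Char)) (p : List Char) :
    p ∈ L.foldl (fun s q =>
        if q.2 == '/' then PySem.Set.add s (PySem.List.slice cs none (some q.1)) else s) s0 ↔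
      p ∈ s0 ∨ ∃ q ∈ L, q.2 = '/' ∧ p = PySem.List.slice cs none (some q.1) := by
  induction L generalizing s0 with
  | nil => simp
  | cons q L ih =>
    rw [List.foldl_cons]
    by_cases h : q.2 = '/'
    · rw [if_pos (by simpa using h), ih]
      constructor
      · rintro (hs | ⟨q', hq', hP⟩)
        · rcases (PySem.Set.mem_add s0 _ p).1 hs with h0 | rfl
          · exact Or.inl h0
          · exact Or.inr ⟨q, List.mem_cons_self, h, rfl⟩
        · exact Or.inr ⟨q', List.mem_cons_of_mem _ hq', hP⟩
      · rintro (h0 | ⟨q', hq', h2, h3⟩)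
        · exact Or.inl ((PySem.Set.mem_add s0 _ p).2 (Or.inl h0))
        · rcases List.mem_cons.1 hq' with rfl | hm
          · exact Or.inl ((PySem.Set.mem_add s0 _ p).2 (Or.inr h3))
          · exact Or.inr ⟨q', hm, h2, h3⟩
    · rw [if_neg (by simpa using h), ih]
      constructor
      · rintro (h0 | ⟨q', hq', hP⟩)
        · exact Or.inl h0
        · exact Or.inr ⟨q', List.mem_cons_of_mem _ hq', hP⟩
      · rintro (h0 | ⟨q', hq', h2, h3⟩)
        · exact Or.inl h0
        · rcases List.mem_cons.1 hq' with rfl | hm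
          · exact absurd h2 h
          · exact Or.inr ⟨q', hm, h2, h3⟩

-- membership in the whole ancestors set
theorem fmbc_mem_ancestors (changed : List String) (p : List Char) :
    p ∈ fmbcAncestors changed ↔
      ∃ item ∈ changed, p = item.toList ∨
        ∃ (i : Nat), ∃ _ : i < item.toList.length, item.toList[i] = '/' ∧ p = item.toList.take i := by
  have gen : ∀ (s0 : PySem.Set (List Char)),
      p ∈ changed.foldl (fun anc item =>
        PySem.Set.add
          ((PySem.List.enumerate item.toList).foldl
            (fun anc2 q =>
              if q.2 == '/' then PySem.Set.add anc2 (PySem.List.slice item.toList none (some q.1))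
              else anc2) anc)
          item.toList) s0 ↔
        p ∈ s0 ∨ ∃ item ∈ changed, p = item.toList ∨
          ∃ (i : Nat), ∃ _ : i < item.toList.length, item.toList[i] = '/' ∧ p = item.toList.take i := by
    induction changed with
    | nil => intro s0; simp
    | cons it rest ih =>
      intro s0
      rw [List.foldl_cons, ih]
      constructor
      · rintro (hadd | ⟨item, hm, hcase⟩)
        · rcases (PySem.Set.mem_add _ _ p).1 hadd with hin | rfl
          · rcases (fmbc_mem_inner it.toList _ s0 p).1 hin with h0 | ⟨q, hq, hsl, hp⟩
            · exact Or.inl h0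
            · refine Or.inr ⟨it, List.mem_cons_self, Or.inr ?_⟩
              rcases (PySem.List.mem_enumerate_iff _ _ _).1 hq with ⟨k, hk, hqe⟩
              refine ⟨k, hk, ?_, ?_⟩
              · rw [hqe] at hsl; exact hsl
              · rw [hp, hqe]
                simp
          · exact Or.inr ⟨it, List.mem_cons_self, Or.inl rfl⟩
        · exact Or.inr ⟨item, List.mem_cons_of_mem _ hm, hcase⟩
      · rintro (h0 | ⟨item, hm, hcase⟩)
        · exact Or.inl ((PySem.Set.mem_add _ _ p).2
            (Or.inl ((fmbc_mem_inner it.toList _ s0 p).2 (Or.inl h0))))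
        · rcases List.mem_cons.1 hm with rfl | hm'
          · rcases hcase with hfull | ⟨i, hi, hc, hp⟩
            · exact Or.inl ((PySem.Set.mem_add _ _ p).2 (Or.inr hfull))
            · refine Or.inl ((PySem.Set.mem_add _ _ p).2 (Or.inl
                ((fmbc_mem_inner item.toList _ s0 p).2 (Or.inr
                  ⟨((0 : Int) + i, item.toList[i]), ?_, hc, ?_⟩))))
              · exact (PySem.List.mem_enumerate_iff _ _ _).2 ⟨i, hi, rfl⟩
              · rw [hp]
                simp
          · exact Or.inr ⟨item, hm', hcase⟩
  simpa [fmbcAncestors, PySem.Set.empty] using gen PySem.Set.empty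

-- A's per-item test says exactly "p is the item or one of its slash-ancestors"
theorem fmbc_item_iff (item p : List Char) :
    (item = p ∨ (p ++ ['/']) <+: item) ↔
      (p = item ∨ ∃ (i : Nat), ∃ _ : i < item.length, item[i] = '/' ∧ p = item.take i) := by
  constructor
  · rintro (rfl | ⟨t, ht⟩)
    · exact Or.inl rfl
    · have ht' : p ++ '/' :: t = item := by simpa using ht
      subst ht'
      refine Or.inr ⟨p.length, by simp, by simp, by simp⟩
  · rintro (rfl | ⟨i, hi, hc, hp⟩)
    · exact Or.inl rfl
    · refine Or.inr ?_
      have hlen : p.length = i := by rw [hp]; exact List.length_take_of_le (by omega)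
      have : p ++ ['/'] = item.take (i + 1) := by
        rw [List.take_add_one, ← hp, List.getElem?_eq_getElem hi, hc]
        rfl
      rw [this]
      exact List.take_prefix _ _

-- Set.contains is membership
theorem fmbc_contains_iff (changed : List String) (p : List Char) :
    PySem.Set.contains (fmbcAncestors changed) p = true ↔ p ∈ fmbcAncestors changed :=
  List.contains_iff_mem

-- the two per-module tests compute the same Bool
theorem fmbc_tests_agree (changed : List String) (module : List (String × String)) :
    (let p := (PySem.Str.stripChars ((PySem.Dict.mk module).getD "path" "") "/").toList
     (!p.isEmpty && PySem.Set.contains (fmbcAncestors changed) p)) = fmbcTouched changed module := by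
  have key : ∀ q : List Char,
      (!q.isEmpty && PySem.Set.contains (fmbcAncestors changed) q) =
        (if q.isEmpty then false
         else changed.any fun item =>
           item.toList == q || PySem.Chars.startswith item.toList (q ++ ['/'])) := by
    intro q
    by_cases hnil : q.isEmpty
    · simp [hnil]
    · simp only [hnil, Bool.false_eq_true, if_false, Bool.not_false, Bool.true_and]
      rw [Bool.eq_iff_iff, fmbc_contains_iff, fmbc_mem_ancestors, List.any_eq_true]
      constructor
      · rintro ⟨item, hm, hcase⟩
        refine ⟨item, hm, ?_⟩
        have := (fmbc_item_iff item.toList q).2 (by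
          rcases hcase with h1 | h2
          · exact Or.inl h1
          · exact Or.inr h2)
        rcases this with h1 | h2
        · simp [h1]
        · simp [PySem.Chars.startswith_iff, h2]
      · rintro ⟨item, hm, hb⟩
        refine ⟨item, hm, ?_⟩
        have : item.toList = q ∨ (q ++ ['/']) <+: item.toList := by
          rw [Bool.or_eq_true] at hb
          rcases hb with h1 | h2
          · exact Or.inl (by simpa using h1)
          · exact Or.inr ((PySem.Chars.startswith_iff _ _).1 h2)
        rcases (fmbc_item_iff item.toList q).1 this with h1 | h2
        · exact Or.inl h1
        · exact Or.inr h2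
  exact key _

-- ===== VERDICT (by name: the statement is the Claim_ definition above) =====
theorem filter_modules_by_changes_spec : Claim_equal_filter_modules_by_changes := by
  intro modules changed_paths _
  unfold Spec_filter_modules_by_changes filter_modules_by_changes filter_modules_by_changes_alt
  by_cases hc : changed_paths.isEmpty
  · simp [hc]
  · simp only [hc]
    have hfold : modules.foldl (fun acc module =>
        let p := (PySem.Str.stripChars ((PySem.Dict.mk module).getD "path" "") "/").toList
        if !p.isEmpty && PySem.Set.contains (fmbcAncestors changed_paths) p then acc ++ [module] else acc) [] =
        modules.filter (fun module => fmbcTouched changed_paths module) := by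
      rw [PySem.List.foldl_append_if_eq_filter]
      simp only [List.nil_append]
      exact List.filter_congr (fun module _ => fmbc_tests_agree changed_paths module)
    rw [hfold]
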